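-- pv_equiv track=rewrite | github.com/HamzaMemon92/WhatsApp-AutoBot | client.py | extract_last_sender
-- ===== SOURCE A (Python) =====
-- def extract_last_sender(chat_history: str) -> str:
--     lines = chat_history.strip().split("\n")
--     for line in reversed(lines):
--         if "]" in line and ":" in line:
--             name = line.split("]")[1].split(":")[0].strip()
--             if "Hamza" not in name:
--                 return name
--     return ""  # fallback if no sender found
-- ===== SOURCE B (Python) =====
-- def extract_last_sender(chat_history: str) -> str:
--     result = ""
--     for line in chat_history.strip().split("\n"):
--         if "]" in line and ":" in line:
--             name = line.split("]")[1].split(":")[0].strip()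
--             if "Hamza" not in name:
--                 result = name
--     return result
-- ===== Notes on version B (the rewrite author's own statement) =====
-- stated objective: alternative
-- what changed: Replaces the reverse-iteration early-return scan with a single forward pass keeping a last-write-wins accumulator, returning it after the loop.
import Mathlib
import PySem

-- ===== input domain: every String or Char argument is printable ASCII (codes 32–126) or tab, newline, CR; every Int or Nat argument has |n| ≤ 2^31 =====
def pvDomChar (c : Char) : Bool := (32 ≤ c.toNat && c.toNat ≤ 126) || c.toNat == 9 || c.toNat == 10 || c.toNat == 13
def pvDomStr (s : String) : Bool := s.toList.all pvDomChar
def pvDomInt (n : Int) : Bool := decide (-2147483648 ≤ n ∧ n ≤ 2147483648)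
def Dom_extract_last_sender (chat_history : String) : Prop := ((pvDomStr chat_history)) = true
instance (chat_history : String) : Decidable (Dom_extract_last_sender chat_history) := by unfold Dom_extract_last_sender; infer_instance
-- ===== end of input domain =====

-- B replaces A's reverse-iteration early-return scan by a forward last-write-wins accumulator; return values proved equal (alternative decomposition).

-- split? is none only for sep = ""; all separators here are nonempty literals, so .getD [] is exact
-- ===== PORT A =====
-- name = line.split("]")[1].split(":")[0].strip(); the [1] index is in range because the guard ensures "]" occurs in line
def elsName (line : String) : String :=
  PySem.Str.strip
    ((PySem.List.pyGet? ((PySem.Str.split? ((PySem.List.pyGet? ((PySem.Str.split? line "]").getD []) 1).getD "") ":").getD []) 0).getD "")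

-- the 'for line in reversed(lines): … return name' loop, as structural recursion on the reversed list
def elsGoA : List String → String
  | [] => ""
  | line :: rest =>
      if PySem.Str.isIn "]" line && PySem.Str.isIn ":" line then
        let name := elsName line
        if !PySem.Str.isIn "Hamza" name then name else elsGoA rest
      else elsGoA rest

def extract_last_sender (chat_history : String) : String :=
  elsGoA (((PySem.Str.split? (PySem.Str.strip chat_history) "\n").getD []).reverse)

-- ===== PORT B =====
def extract_last_sender_alt (chat_history : String) : String :=
  ((PySem.Str.split? (PySem.Str.strip chat_history) "\n").getD []).foldl
    (fun result line =>
      if PySem.Str.isIn "]" line && PySem.Str.isIn ":" line then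
        let name := elsName line
        if !PySem.Str.isIn "Hamza" name then name else result
      else result) ""

-- ===== PRECONDITION & SPEC =====
def Spec_extract_last_sender (chat_history : String) (out : String) : Prop := out = extract_last_sender_alt chat_history
instance (chat_history : String) (out : String) : Decidable (Spec_extract_last_sender chat_history out) := by unfold Spec_extract_last_sender; infer_instance

-- ===== CLAIM (what is proved, stated in full; the proofs are below) =====
def Claim_equal_extract_last_sender : Prop := ∀ (chat_history : String), Dom_extract_last_sender chat_history → Spec_extract_last_sender chat_history (extract_last_sender chat_history)

-- ===== LEMMAS AND PROOFS =====

-- the combined per-line test: valid line whose parsed name does not contain "Hamza"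
def elsHit (line : String) : Bool :=
  (PySem.Str.isIn "]" line && PySem.Str.isIn ":" line) && !PySem.Str.isIn "Hamza" (elsName line)

-- first hit of the list, as an Option
def elsFr : List String → Option String
  | [] => none
  | l :: t => if elsHit l then some (elsName l) else elsFr t

theorem elsStep (a l : String) :
    (if PySem.Str.isIn "]" l && PySem.Str.isIn ":" l then
        let name := elsName l
        if !PySem.Str.isIn "Hamza" name then name else a
      else a) = if elsHit l then elsName l else a := by
  simp only [elsHit]
  split_ifs <;> simp_all

theorem elsGoA_cons (l : String) (t : List String) :
    elsGoA (l :: t) = if elsHit l then elsName l else elsGoA t := by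
  simp only [elsGoA]
  exact elsStep (elsGoA t) l

theorem elsGoA_eq_fr (ls : List String) : elsGoA ls = (elsFr ls).getD "" := by
  induction ls with
  | nil => rfl
  | cons l t ih =>
    rw [elsGoA_cons, elsFr]
    by_cases h : elsHit l = true <;> simp [h, ih]

theorem elsFr_append (xs ys : List String) :
    elsFr (xs ++ ys) = ((elsFr xs).orElse (fun _ => elsFr ys)) := by
  induction xs with
  | nil => rfl
  | cons l t ih =>
    simp only [List.cons_append, elsFr, ih]
    by_cases h : elsHit l = true <;> simp [h]

theorem elsFoldl_eq_fr (ls : List String) (a : String) :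
    ls.foldl (fun result line =>
      if PySem.Str.isIn "]" line && PySem.Str.isIn ":" line then
        let name := elsName line
        if !PySem.Str.isIn "Hamza" name then name else result
      else result) a = (elsFr ls.reverse).getD a := by
  induction ls generalizing a with
  | nil => rfl
  | cons l t ih =>
    rw [List.foldl_cons, ih, List.reverse_cons, elsFr_append, elsStep]
    cases hfr : elsFr t.reverse with
    | some x => simp [Option.orElse]
    | none =>
      simp only [Option.orElse, Option.getD]
      by_cases h : elsHit l = true <;> simp [elsFr, h]

-- ===== VERDICT (by name: the statement is the Claim_ definition above) =====
theorem extract_last_sender_spec : Claim_equal_extract_last_sender := by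
  intro chat_history _
  unfold Spec_extract_last_sender extract_last_sender extract_last_sender_alt
  rw [elsGoA_eq_fr, elsFoldl_eq_fr]
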